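-- pv_equiv track=rewrite | github.com/pmlmodelling/nctoolkit | nctoolkit/assign.py | find_parens3
-- ===== SOURCE A (Python) =====
-- def find_parens3(s):
--     toret = {}
--     pstack = []
--
--     for i, c in enumerate(s):
--         if c == "(":
--             pstack.append(i)
--         elif c == ")":
--             if len(pstack) == 0:
--                 raise IndexError("No matching closing parens at: " + str(i))
--             toret[pstack.pop()] = i
--
--     if len(pstack) > 0:
--         raise IndexError("No matching opening parens at: " + str(pstack.pop()))
--
--     return toret
-- ===== SOURCE B (Python) =====
-- def find_parens3(s):
--     toret = {}
--
--     def parse(open_idx, start):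
--         # scan forward from start; on '(' recurse, on ')' close open_idx
--         j = start
--         while j < len(s):
--             c = s[j]
--             if c == "(":
--                 j = parse(j, j + 1)
--             elif c == ")":
--                 toret[open_idx] = j
--                 return j + 1
--             else:
--                 j += 1
--         raise IndexError("No matching opening parens at: " + str(open_idx))
--
--     i = 0
--     while i < len(s):
--         c = s[i]
--         if c == "(":
--             i = parse(i, i + 1)
--         elif c == ")":
--             raise IndexError("No matching closing parens at: " + str(i))
--         else:
--             i += 1
--     return toret
-- ===== Notes on version B (the rewrite author's own statement) =====
-- stated objective: alternative
-- what changed: Replaces the single stack-driven loop (explicit pstack list plus dict) by a recursive-descent matcher: a top-level scan that on '(' calls a recursive parse helper which consumes up to the matching ')' and returns the resume position, the call stack replacing pstack.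
-- outside the precondition, e.g. on find_parens3('('): A raises IndexError, B raises IndexError; on find_parens3(')'): A raises IndexError, B raises IndexError
import Mathlib
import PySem

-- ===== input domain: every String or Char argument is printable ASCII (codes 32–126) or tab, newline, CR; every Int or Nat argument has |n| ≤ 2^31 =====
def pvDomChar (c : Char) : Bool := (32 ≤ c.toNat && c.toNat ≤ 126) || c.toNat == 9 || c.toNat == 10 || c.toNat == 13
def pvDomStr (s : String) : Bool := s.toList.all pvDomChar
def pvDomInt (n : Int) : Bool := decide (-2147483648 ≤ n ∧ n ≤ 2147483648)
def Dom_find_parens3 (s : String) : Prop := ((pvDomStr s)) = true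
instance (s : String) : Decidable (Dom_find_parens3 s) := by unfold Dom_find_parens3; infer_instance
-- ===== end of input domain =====

-- B replaces A's explicit-stack loop by a recursive-descent matcher (same O(n) cost, different decomposition);
-- Pre_ restricts to balanced-parenthesis strings, exactly the inputs where A returns instead of raising IndexError.


-- ===== PORT A =====
-- A's loop over enumerate(s): '(' pushes its index on pstack, ')' pops and records in toret.
-- On stack underflow / leftover stack Python raises IndexError (excluded by Pre_); the port just stops / returns toret there.
def goA : List Char → Nat → PySem.Dict Int Int → List Nat → PySem.Dict Int Int × List Nat
  | [], _, d, st => (d, st)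
  | c :: t, i, d, st =>
    if c = '(' then goA t (i + 1) d (i :: st)
    else if c = ')' then
      match st with
      | [] => (d, st)          -- Python: raise IndexError (input outside Pre_)
      | p :: r => goA t (i + 1) (d.insert (p : Int) (i : Int)) r
    else goA t (i + 1) d st

def find_parens3 (s : String) : List (Int × Int) :=
  ((goA s.toList 0 PySem.Dict.empty []).1).items

-- ===== PORT B =====
-- B's parse(open_idx, start): scans forward, recursing on '(' , closing open_idx on ')'.
-- fuel (2*|s|+2 suffices, proved in the lemmas) makes the recursion well-founded; none = the Python raises.
def parseB : Nat → Nat → List Char → Nat → PySem.Dict Int Int → Option (PySem.Dict Int Int × List Char × Nat)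
  | 0, _, _, _, _ => none
  | fuel + 1, o, cs, j, d =>
    match cs with
    | [] => none               -- Python: raise IndexError("No matching opening parens …")
    | c :: t =>
      if c = '(' then
        match parseB fuel j t (j + 1) d with
        | none => none
        | some (d', r, j') => parseB fuel o r j' d'
      else if c = ')' then
        some (d.insert (o : Int) (j : Int), t, j + 1)
      else parseB fuel o t (j + 1) d

-- B's top-level scan
def topB : Nat → List Char → Nat → PySem.Dict Int Int → Option (PySem.Dict Int Int)
  | 0, _, _, _ => none
  | fuel + 1, cs, i, d =>
    match cs with
    | [] => some d
    | c :: t =>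
      if c = '(' then
        match parseB fuel i t (i + 1) d with
        | none => none
        | some (d', r, i') => topB fuel r i' d'
      else if c = ')' then none  -- Python: raise IndexError("No matching closing parens …")
      else topB fuel t (i + 1) d

def find_parens3_alt (s : String) : List (Int × Int) :=
  match topB (2 * s.toList.length + 2) s.toList 0 PySem.Dict.empty with
  | some d => d.items
  | none => []                 -- unreachable under Pre_ (the Python B raises there)

-- ===== PRECONDITION & SPEC =====
-- Pre_ = balanced parentheses: every prefix has at least as many '(' as ')' and totals agree.
-- Exactly the inputs on which Python A returns normally (otherwise A raises IndexError).
def Pre_find_parens3 (s : String) : Prop :=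
  (∀ n ∈ List.range (s.toList.length + 1),
      (s.toList.take n).count ')' ≤ (s.toList.take n).count '(') ∧
  s.toList.count '(' = s.toList.count ')'

instance (s : String) : Decidable (Pre_find_parens3 s) := by
  unfold Pre_find_parens3; infer_instance

def pvWitness_find_parens3 : String := "a(b(c)d)()e"

def Spec_find_parens3 (s : String) (out : List (Int × Int)) : Prop := out = find_parens3_alt s
instance (s : String) (out : List (Int × Int)) : Decidable (Spec_find_parens3 s out) := by
  unfold Spec_find_parens3; infer_instance

-- ===== CLAIM (what is proved, stated in full; the proofs are below) =====
def Claim_equal_find_parens3 : Prop :=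
  ∀ (s : String), Dom_find_parens3 s → Pre_find_parens3 s → Spec_find_parens3 s (find_parens3 s)

-- ===== LEMMAS AND PROOFS =====

-- balance of a chunk: no prefix dips below 0, net change 0
def Bal (u : List Char) : Prop :=
  (∀ n : Nat, (u.take n).count ')' ≤ (u.take n).count '(') ∧ u.count '(' = u.count ')'

lemma goA_append : ∀ (a b : List Char) (j : Nat) (d : PySem.Dict Int Int) (st : List Nat),
    (∀ n : Nat, (a.take n).count ')' ≤ (a.take n).count '(' + st.length) →
    goA (a ++ b) j d st = goA b (j + a.length) (goA a j d st).1 (goA a j d st).2 := by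
  intro a
  induction a with
  | nil => intro b j d st _; simp [goA]
  | cons c t ih =>
    intro b j d st h
    by_cases h1 : c = '('
    · have h' : ∀ n : Nat, (t.take n).count ')' ≤ (t.take n).count '(' + (j :: st).length := by
        intro n; have := h (n + 1)
        simp [List.take_succ_cons, h1, List.count_cons] at this ⊢; omega
      subst h1
      simp [goA, ih _ _ _ _ h', Nat.add_assoc, Nat.add_comm 1]
    · by_cases h2 : c = ')'
      · have h0 := h 1
        simp [List.take_succ_cons, h2, List.count_cons] at h0
        cases st with
        | nil => simp at h0
        | cons p r =>
          have h' : ∀ n : Nat, (t.take n).count ')' ≤ (t.take n).count '(' + r.length := by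
            intro n; have := h (n + 1)
            simp [List.take_succ_cons, h2, List.count_cons] at this ⊢; omega
          simp [goA, h1, h2, ih _ _ _ _ h', Nat.add_assoc, Nat.add_comm 1]
      · have h' : ∀ n : Nat, (t.take n).count ')' ≤ (t.take n).count '(' + st.length := by
          intro n; have := h (n + 1)
          simp [List.take_succ_cons, h1, h2, List.count_cons] at this ⊢; omega
        simp [goA, h1, h2, ih _ _ _ _ h', Nat.add_assoc, Nat.add_comm 1]

-- the part of the stack below the slack level is never touched
lemma goA_deep : ∀ (u : List Char) (j : Nat) (d : PySem.Dict Int Int) (st1 st2 : List Nat),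
    (∀ n : Nat, (u.take n).count ')' ≤ (u.take n).count '(' + st1.length) →
    goA u j d (st1 ++ st2) = ((goA u j d st1).1, (goA u j d st1).2 ++ st2) := by
  intro u
  induction u with
  | nil => intro j d st1 st2 _; simp [goA]
  | cons c t ih =>
    intro j d st1 st2 h
    by_cases h1 : c = '('
    · have h' : ∀ n : Nat, (t.take n).count ')' ≤ (t.take n).count '(' + (j :: st1).length := by
        intro n
        have := h (n + 1)
        simp [List.take_succ_cons, h1, List.count_cons] at this ⊢
        omega
      simpa [goA, h1] using ih (j + 1) d (j :: st1) st2 h'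
    · by_cases h2 : c = ')'
      · have h0 := h 1
        simp [List.take_succ_cons, h2, List.count_cons] at h0
        cases st1 with
        | nil => simp at h0
        | cons p r =>
          have h' : ∀ n : Nat, (t.take n).count ')' ≤ (t.take n).count '(' + r.length := by
            intro n
            have := h (n + 1)
            simp [List.take_succ_cons, h2, List.count_cons] at this ⊢
            omega
          simpa [goA, h1, h2] using ih (j + 1) (d.insert (p : Int) (j : Int)) r st2 h'
      · have h' : ∀ n : Nat, (t.take n).count ')' ≤ (t.take n).count '(' + st1.length := by
          intro n
          have := h (n + 1)
          simp [List.take_succ_cons, h1, h2, List.count_cons] at this ⊢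
          omega
        simpa [goA, h1, h2] using ih (j + 1) d st1 st2 h'

-- stack length bookkeeping
lemma goA_len : ∀ (u : List Char) (j : Nat) (d : PySem.Dict Int Int) (st : List Nat),
    (∀ n : Nat, (u.take n).count ')' ≤ (u.take n).count '(' + st.length) →
    (goA u j d st).2.length + u.count ')' = st.length + u.count '(' := by
  intro u
  induction u with
  | nil => intro j d st _; simp [goA]
  | cons c t ih =>
    intro j d st h
    by_cases h1 : c = '('
    · have h' : ∀ n : Nat, (t.take n).count ')' ≤ (t.take n).count '(' + (j :: st).length := by
        intro n; have := h (n + 1)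
        simp [List.take_succ_cons, h1, List.count_cons] at this ⊢; omega
      have := ih (j + 1) d (j :: st) h'
      simp [goA, h1, List.count_cons] at this ⊢
      omega
    · by_cases h2 : c = ')'
      · have h0 := h 1
        simp [List.take_succ_cons, h2, List.count_cons] at h0
        cases st with
        | nil => simp at h0
        | cons p r =>
          have h' : ∀ n : Nat, (t.take n).count ')' ≤ (t.take n).count '(' + r.length := by
            intro n; have := h (n + 1)
            simp [List.take_succ_cons, h2, List.count_cons] at this ⊢; omega
          have := ih (j + 1) (d.insert (p : Int) (j : Int)) r h'
          simp [goA, h1, h2, List.count_cons] at this ⊢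
          omega
      · have h' : ∀ n : Nat, (t.take n).count ')' ≤ (t.take n).count '(' + st.length := by
          intro n; have := h (n + 1)
          simp [List.take_succ_cons, h1, h2, List.count_cons] at this ⊢; omega
        have := ih (j + 1) d st h'
        simp [goA, h1, h2, List.count_cons] at this ⊢
        omega

-- on a balanced chunk goA preserves any stack and its dict result ignores the stack
lemma goA_bal (u : List Char) (hu : Bal u) (j : Nat) (d : PySem.Dict Int Int) (st : List Nat) :
    goA u j d st = ((goA u j d []).1, st) := by
  obtain ⟨hnn, heq⟩ := hu
  have h0 : ∀ n : Nat, (u.take n).count ')' ≤ (u.take n).count '(' + ([] : List Nat).length := by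
    intro n; simpa using hnn n
  have hdeep := goA_deep u j d [] st h0
  have hlen := goA_len u j d [] h0
  simp at hdeep hlen
  have : (goA u j d []).2 = [] := by
    have : (goA u j d []).2.length = 0 := by omega
    exact List.eq_nil_of_length_eq_zero this
  rw [hdeep, this]
  simp

-- first return to depth -1: t with net ')' surplus k+1 splits at the first dip below level k
lemma dip : ∀ (t : List Char) (k : Nat),
    t.count ')' = t.count '(' + k + 1 →
    (∀ n : Nat, (t.take n).count ')' ≤ (t.take n).count '(' + k + 1) →
    ∃ w z, t = w ++ ')' :: z ∧
      (∀ n : Nat, (w.take n).count ')' ≤ (w.take n).count '(' + k) ∧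
      w.count ')' = w.count '(' + k := by
  intro t
  induction t with
  | nil => intro k hc _; simp at hc
  | cons c t ih =>
    intro k hc hn
    by_cases h2 : c = ')'
    · cases k with
      | zero =>
        refine ⟨[], t, by simp [h2], by simp, by simp⟩
      | succ k' =>
        have hc' : t.count ')' = t.count '(' + k' + 1 := by
          simp [h2, List.count_cons] at hc; omega
        have hn' : ∀ n : Nat, (t.take n).count ')' ≤ (t.take n).count '(' + k' + 1 := by
          intro n; have := hn (n + 1)
          simp [List.take_succ_cons, h2, List.count_cons] at this; omega
        obtain ⟨w, z, hsplit, hwn, hwc⟩ := ih k' hc' hn'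
        refine ⟨')' :: w, z, by simp [h2, hsplit], ?_, ?_⟩
        · intro n
          cases n with
          | zero => simp
          | succ m =>
            have := hwn m
            simp [List.take_succ_cons, List.count_cons]
            omega
        · simp [List.count_cons]; omega
    · by_cases h1 : c = '('
      · have hc' : t.count ')' = t.count '(' + (k + 1) + 1 := by
          simp [h1, List.count_cons] at hc ⊢; omega
        have hn' : ∀ n : Nat, (t.take n).count ')' ≤ (t.take n).count '(' + (k + 1) + 1 := by
          intro n; have := hn (n + 1)
          simp [List.take_succ_cons, h1, List.count_cons] at this ⊢; omega
        obtain ⟨w, z, hsplit, hwn, hwc⟩ := ih (k + 1) hc' hn'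
        refine ⟨'(' :: w, z, by simp [h1, hsplit], ?_, ?_⟩
        · intro n
          cases n with
          | zero => simp
          | succ m =>
            have := hwn m
            simp [List.take_succ_cons, h1, List.count_cons]
            omega
        · simp [h1, List.count_cons]; omega
      · have hc' : t.count ')' = t.count '(' + k + 1 := by
          simp [h1, h2, List.count_cons] at hc ⊢; omega
        have hn' : ∀ n : Nat, (t.take n).count ')' ≤ (t.take n).count '(' + k + 1 := by
          intro n; have := hn (n + 1)
          simp [List.take_succ_cons, h1, h2, List.count_cons] at this ⊢; omega
        obtain ⟨w, z, hsplit, hwn, hwc⟩ := ih k hc' hn'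
        refine ⟨c :: w, z, by simp [hsplit], ?_, ?_⟩
        · intro n
          cases n with
          | zero => simp
          | succ m =>
            have := hwn m
            simp [List.take_succ_cons, h1, h2, List.count_cons]
            omega
        · simp [h1, h2, List.count_cons]; omega

-- split a balanced '('-headed chunk: '(' :: t balanced gives t = w ++ ')' :: z with w, z balanced
lemma bal_split (t : List Char) (hb : Bal ('(' :: t)) :
    ∃ w z, t = w ++ ')' :: z ∧ Bal w ∧ Bal z := by
  obtain ⟨hnn, heq⟩ := hb
  have hc : t.count ')' = t.count '(' + 0 + 1 := by
    simp [List.count_cons] at heq; omega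
  have hn : ∀ n : Nat, (t.take n).count ')' ≤ (t.take n).count '(' + 0 + 1 := by
    intro n; have := hnn (n + 1)
    simp [List.take_succ_cons, List.count_cons] at this; omega
  obtain ⟨w, z, hsplit, hwn, hwc⟩ := dip t 0 hc hn
  refine ⟨w, z, hsplit, ⟨by simpa using hwn, by omega⟩, ?_, ?_⟩
  · -- prefixes of z
    intro n
    have := hnn (w.length + 1 + n + 1)
    rw [hsplit] at this
    have htk : (('(' :: (w ++ ')' :: z)).take (w.length + 1 + n + 1)) =
        '(' :: (w ++ ')' :: z.take n) := by
      rw [List.take_succ_cons, show w.length + 1 + n = w.length + (n + 1) by omega,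
        List.take_append, List.take_of_length_le (by omega : w.length ≤ w.length + (n + 1)),
        show w.length + (n + 1) - w.length = n + 1 by omega, List.take_succ_cons]
    rw [htk] at this
    simp [List.count_cons, List.count_append] at this
    omega
  · -- net of z
    rw [hsplit] at heq
    simp [List.count_cons, List.count_append] at heq
    omega

-- main lemma for parseB: on a balanced chunk u followed by the matching ')', parseB closes o there
lemma parseB_spec : ∀ (N : Nat) (u : List Char), u.length ≤ N →
    ∀ (fuel : Nat), 2 * u.length + 2 ≤ fuel → Bal u →
    ∀ (v : List Char) (o j : Nat) (d : PySem.Dict Int Int),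
    parseB fuel o (u ++ ')' :: v) j d =
      some (((goA u j d []).1).insert (o : Int) ((j + u.length : Nat) : Int), v, j + u.length + 1) := by
  intro N
  induction N with
  | zero =>
    intro u hu fuel hfuel _ v o j d
    have : u = [] := List.eq_nil_of_length_eq_zero (by omega)
    subst this
    match fuel, hfuel with
    | f + 1, _ => simp [parseB, goA]
  | succ N ih =>
    intro u hu fuel hfuel hb v o j d
    match u, hb with
    | [], _ =>
      match fuel, hfuel with
      | f + 1, _ => simp [parseB, goA]
    | c :: t, hb =>
      match fuel, hfuel with
      | f + 1, hfuel =>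
        by_cases h1 : c = '('
        · subst h1
          obtain ⟨w, z, hsplit, hbw, hbz⟩ := bal_split t hb
          subst hsplit
          have hinner := ih w (by simp at hu; omega) f (by simp at hfuel; omega) hbw
            (z ++ ')' :: v) j (j + 1) d
          have houter := ih z (by simp at hu; omega) f (by simp at hfuel; omega) hbz
            v o (j + 1 + w.length + 1)
            (((goA w (j + 1) d []).1).insert (j : Int) ((j + 1 + w.length : Nat) : Int))
          have hA : (goA ('(' :: (w ++ ')' :: z)) j d []).1 =
              (goA z (j + 1 + w.length + 1)
                (((goA w (j + 1) d []).1).insert (j : Int) ((j + 1 + w.length : Nat) : Int)) []).1 := by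
            have h2 : goA ('(' :: (w ++ ')' :: z)) j d [] = goA (w ++ ')' :: z) (j + 1) d [j] := by
              simp [goA]
            have hw1 : ∀ n : Nat, (w.take n).count ')' ≤ (w.take n).count '(' + ([j] : List Nat).length := by
              intro n; have := hbw.1 n; simp; omega
            rw [h2, goA_append w (')' :: z) (j + 1) d [j] hw1, goA_bal w hbw (j + 1) d [j]]
            simp [goA]
          rw [show ('(' :: (w ++ ')' :: z)) ++ ')' :: v = '(' :: ((w ++ ')' :: (z ++ ')' :: v))) by simp]
          rw [show ('(' :: (w ++ ')' :: z)).length = w.length + z.length + 2 from (by simp; omega)]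
          simp only [parseB, if_pos rfl]
          rw [hinner]
          simp only []
          rw [houter, hA]
          rw [show j + 1 + w.length + 1 + z.length = j + (w.length + z.length + 2) by omega]
          simp
        · by_cases h2 : c = ')'
          · exfalso
            have := hb.1 1
            simp [List.take_succ_cons, h2, List.count_cons] at this
          · have hbt : Bal t := by
              constructor
              · intro n
                have := hb.1 (n + 1)
                simp [List.take_succ_cons, h1, h2, List.count_cons] at this
                omega
              · have := hb.2
                simp [h1, h2, List.count_cons] at this
                exact this
            have := ih t (by simp at hu; omega) f (by simp at hfuel; omega) hbt v o (j + 1) d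
            rw [show (c :: t) ++ ')' :: v = c :: (t ++ ')' :: v) by simp]
            rw [show (c :: t).length = t.length + 1 from (by simp)]
            have hgo : goA (c :: t) j d [] = goA t (j + 1) d [] := by
              simp [goA, h1, h2]
            simp only [parseB, if_neg h1, if_neg h2]
            rw [this, hgo, show j + 1 + t.length = j + (t.length + 1) by omega]

-- main lemma for topB
lemma topB_spec : ∀ (N : Nat) (u : List Char), u.length ≤ N →
    ∀ (fuel : Nat), 2 * u.length + 2 ≤ fuel → Bal u →
    ∀ (j : Nat) (d : PySem.Dict Int Int),
    topB fuel u j d = some (goA u j d []).1 := by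
  intro N
  induction N with
  | zero =>
    intro u hu fuel hfuel _ j d
    have : u = [] := List.eq_nil_of_length_eq_zero (by omega)
    subst this
    match fuel, hfuel with
    | f + 1, _ => simp [topB, goA]
  | succ N ih =>
    intro u hu fuel hfuel hb j d
    match u, hb with
    | [], _ =>
      match fuel, hfuel with
      | f + 1, _ => simp [topB, goA]
    | c :: t, hb =>
      match fuel, hfuel with
      | f + 1, hfuel =>
        by_cases h1 : c = '('
        · subst h1
          obtain ⟨w, z, hsplit, hbw, hbz⟩ := bal_split t hb
          subst hsplit
          have hinner := parseB_spec w.length w le_rfl f (by simp at hfuel; omega) hbw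
            z j (j + 1) d
          have houter := ih z (by simp at hu; omega) f (by simp at hfuel; omega) hbz
            (j + 1 + w.length + 1)
            (((goA w (j + 1) d []).1).insert (j : Int) ((j + 1 + w.length : Nat) : Int))
          have hA : (goA ('(' :: (w ++ ')' :: z)) j d []).1 =
              (goA z (j + 1 + w.length + 1)
                (((goA w (j + 1) d []).1).insert (j : Int) ((j + 1 + w.length : Nat) : Int)) []).1 := by
            have h2 : goA ('(' :: (w ++ ')' :: z)) j d [] = goA (w ++ ')' :: z) (j + 1) d [j] := by
              simp [goA]
            have hw1 : ∀ n : Nat, (w.take n).count ')' ≤ (w.take n).count '(' + ([j] : List Nat).length := by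
              intro n; have := hbw.1 n; simp; omega
            rw [h2, goA_append w (')' :: z) (j + 1) d [j] hw1, goA_bal w hbw (j + 1) d [j]]
            simp [goA]
          simp only [topB, if_pos rfl]
          rw [hinner]
          simp only []
          rw [hA]
          exact houter
        · by_cases h2 : c = ')'
          · exfalso
            have := hb.1 1
            simp [List.take_succ_cons, h2, List.count_cons] at this
          · have hbt : Bal t := by
              constructor
              · intro n
                have := hb.1 (n + 1)
                simp [List.take_succ_cons, h1, h2, List.count_cons] at this
                omega
              · have := hb.2
                simp [h1, h2, List.count_cons] at this
                exact this
            have := ih t (by simp at hu; omega) f (by simp at hfuel; omega) hbt (j + 1) d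
            have hgo : goA (c :: t) j d [] = goA t (j + 1) d [] := by
              simp [goA, h1, h2]
            simp only [topB, if_neg h1, if_neg h2]
            rw [this, hgo]

lemma pre_bal (s : String) (h : Pre_find_parens3 s) : Bal s.toList := by
  obtain ⟨hn, hc⟩ := h
  constructor
  · intro n
    by_cases hle : n ≤ s.toList.length
    · exact hn n (List.mem_range.mpr (by omega))
    · have h1 : s.toList.take n = s.toList := List.take_of_length_le (by omega)
      have := hn s.toList.length (List.mem_range.mpr (by omega))
      rw [List.take_length] at this
      rw [h1]
      exact this
  · exact hc

-- ===== VERDICT (by name: the statement is the Claim_ definition above) =====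
theorem find_parens3_spec : Claim_equal_find_parens3 := by
  intro s _ hpre
  unfold Spec_find_parens3 find_parens3 find_parens3_alt
  have hb := pre_bal s hpre
  rw [topB_spec s.toList.length s.toList le_rfl (2 * s.toList.length + 2) le_rfl hb 0
    PySem.Dict.empty]
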